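-- pv_equiv track=rewrite | github.com/tatonka21/bacontools | misc/termdraw/termdraw/csv.py | infer_data_schema
-- ===== SOURCE A (Python) =====
-- def infer_data_schema(data):
-- 	'''Detect what kind of data is received.
--
-- 	Args:
-- 		data(list[tuple]): source CSV data
--
-- 	Returns:
-- 		str: "points" if the data is of form (x,y), "values", if it's of
-- 		     form (y), "mixed", if it's both, "unknown" otherwise
-- 	'''
-- 	single = False
-- 	double = False
-- 	unknown = False
--
-- 	for t in data:
-- 		if (len(t) is 1):
-- 			try:
-- 				float(t[0])
-- 				single = True
-- 			except:
-- 				unknown = True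
-- 		elif (len(t) is 2):
-- 			try:
-- 				float(t[0])
-- 				float(t[1])
-- 				double = True
-- 			except:
-- 				unknown = True
-- 		else:
-- 			unknown = True
--
-- 	if not unknown:
-- 		if single:
-- 			if double:
-- 				return "mixed"
-- 			else:
-- 				return "values"
-- 		elif double:
-- 			return "points"
-- 	else:
-- 		return "unknown"
-- ===== SOURCE B (Python) =====
-- def infer_data_schema(data):
--     '''Detect what kind of data is received (semilattice reduce).
--
--     Each row is mapped directly to a final schema answer ("values", "points"
--     or "unknown"), and the per-row answers are combined with an associative
--     merge ("unknown" absorbing, equal answers idempotent, distinct numeric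
--     shapes give "mixed").  The loop stops early once the absorbing element
--     "unknown" is reached.  Empty data yields None, like A.
--     '''
--     result = None
--     for t in data:
--         result = _merge(result, _row_schema(t))
--         if result == "unknown":
--             break
--     return result
--
--
-- def _row_schema(t):
--     if len(t) == 1:
--         shape = "values"
--     elif len(t) == 2:
--         shape = "points"
--     else:
--         return "unknown"
--     try:
--         for x in t:
--             float(x)
--     except (TypeError, ValueError):
--         return "unknown"
--     return shape
--
--
-- def _merge(a, b):
--     if a is None:
--         return b
--     if a == b:
--         return a
--     if a == "unknown" or b == "unknown":
--         return "unknown"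
--     return "mixed"
-- ===== Notes on version B (the rewrite author's own statement) =====
-- stated objective: alternative
-- what changed: B maps each row directly to a final schema answer ('values'/'points'/'unknown') and reduces these with an associative absorbing merge (equal answers idempotent, 'unknown' absorbing with early loop exit, distinct numeric shapes giving 'mixed'), instead of A's three boolean flags updated per row plus a nested final decision chain.
-- outside the precondition, e.g. on infer_data_schema([]): A returns None, B returns None
import Mathlib
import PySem

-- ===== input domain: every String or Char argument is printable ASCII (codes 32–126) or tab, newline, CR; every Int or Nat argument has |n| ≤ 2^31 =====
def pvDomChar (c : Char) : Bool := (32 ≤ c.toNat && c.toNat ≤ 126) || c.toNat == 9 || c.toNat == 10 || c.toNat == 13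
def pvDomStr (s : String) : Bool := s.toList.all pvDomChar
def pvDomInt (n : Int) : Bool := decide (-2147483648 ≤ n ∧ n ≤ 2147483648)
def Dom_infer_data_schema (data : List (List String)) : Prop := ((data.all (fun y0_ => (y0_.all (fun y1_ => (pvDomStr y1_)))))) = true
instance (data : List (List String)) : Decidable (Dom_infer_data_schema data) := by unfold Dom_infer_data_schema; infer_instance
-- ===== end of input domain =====

-- B maps every row directly to a final schema answer and combines these with an
-- associative absorbing merge, stopping early at "unknown" (objective: alternative).
-- float(s) is not in PySem; the acceptance test of Python's float() builtin is hand-ported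
-- below (floatOk), exact on the printable-ASCII + tab/newline/CR domain, and used by both
-- ports as the shared builtin.

-- digit run with single underscores between digits: consumes digit ('_'? digit)*, returns rest
def pvDigitsTail : List Char → List Char
  | [] => []
  | c :: rest =>
    if c.isDigit then pvDigitsTail rest
    else if c = '_' then
      match rest with
      | d :: r2 => if d.isDigit then pvDigitsTail r2 else c :: rest
      | [] => c :: rest
    else c :: rest

-- at least one digit required
def pvDigitsUS : List Char → Option (List Char)
  | [] => none
  | c :: rest => if c.isDigit then some (pvDigitsTail rest) else none

-- mantissa: digits ['.' [digits]] | '.' digits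
def pvMantissa (cs : List Char) : Option (List Char) :=
  match cs with
  | '.' :: rest => pvDigitsUS rest
  | _ =>
    match pvDigitsUS cs with
    | none => none
    | some r =>
      match r with
      | '.' :: r2 => some ((pvDigitsUS r2).getD r2)
      | r => some r

-- optional exponent: [eE] [+-]? digits
def pvExpOpt (cs : List Char) : Option (List Char) :=
  match cs with
  | c :: rest =>
    if c = 'e' ∨ c = 'E' then
      match rest with
      | s :: r2 => if s = '+' ∨ s = '-' then pvDigitsUS r2 else pvDigitsUS rest
      | [] => none
    else some cs
  | [] => some []

-- float(s) succeeds (no ValueError); exact on the ASCII domain (checked against CPython)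
def floatOk (s : String) : Bool :=
  let cs := PySem.Chars.strip s.toList
  let cs := match cs with
            | c :: r => if c = '+' ∨ c = '-' then r else cs
            | [] => cs
  let low := cs.map Char.toLower
  if low = ['i','n','f'] ∨ low = ['i','n','f','i','n','i','t','y'] ∨ low = ['n','a','n'] then
    true
  else
    match pvMantissa cs with
    | none => false
    | some r =>
      match pvExpOpt r with
      | some [] => true
      | _ => false

-- ===== PORT A =====
-- loop over rows keeping three boolean flags, then the nested final if-chain
def infer_data_schema (data : List (List String)) : String :=
  let st := data.foldl
    (fun (st : Bool × Bool × Bool) t =>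
      let (single, double, unknown) := st
      if t.length == 1 then
        if floatOk (PySem.List.pyGetD t 0 "") then (true, double, unknown)
        else (single, double, true)
      else if t.length == 2 then
        if floatOk (PySem.List.pyGetD t 0 "") && floatOk (PySem.List.pyGetD t 1 "") then
          (single, true, unknown)
        else (single, double, true)
      else (single, double, true))
    (false, false, false)
  match st with
  | (single, double, unknown) =>
    if !unknown then
      if single then (if double then "mixed" else "values")
      else if double then "points"
      else ""   -- Python returns None here (reached only for data = []); excluded by Pre_
    else "unknown"

-- ===== PORT B =====
def rowSchema (t : List String) : String :=
  if t.length == 1 then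
    if t.all floatOk then "values" else "unknown"
  else if t.length == 2 then
    if t.all floatOk then "points" else "unknown"
  else "unknown"

def mergeSchema (a : Option String) (b : String) : String :=
  match a with
  | none => b
  | some a =>
    if a = b then a
    else if a = "unknown" ∨ b = "unknown" then "unknown"
    else "mixed"

-- the loop with its early break at the absorbing element "unknown"
def goB : Option String → List (List String) → Option String
  | acc, [] => acc
  | acc, t :: rest =>
    let acc' := mergeSchema acc (rowSchema t)
    if acc' = "unknown" then some acc' else goB (some acc') rest

def infer_data_schema_alt (data : List (List String)) : String :=
  (goB none data).getD ""   -- Python returns None for data = []; excluded by Pre_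

-- ===== PRECONDITION & SPEC =====
-- Pre_ excludes only the empty list, on which A (and B) return None, not a str.
def Pre_infer_data_schema (data : List (List String)) : Prop := data ≠ []
instance (data : List (List String)) : Decidable (Pre_infer_data_schema data) := by
  unfold Pre_infer_data_schema; infer_instance

def pvWitness_infer_data_schema : List (List String) := [["1"], ["2", "3.5"]]

def Spec_infer_data_schema (data : List (List String)) (out : String) : Prop := out = infer_data_schema_alt data
instance (data : List (List String)) (out : String) : Decidable (Spec_infer_data_schema data out) := by unfold Spec_infer_data_schema; infer_instance

-- ===== CLAIM (what is proved, stated in full; the proofs are below) =====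
def Claim_equal_infer_data_schema : Prop := ∀ (data : List (List String)), Dom_infer_data_schema data → Pre_infer_data_schema data → Spec_infer_data_schema data (infer_data_schema data)

-- ===== LEMMAS AND PROOFS =====

-- the flag triple of A decoded into B's running partial answer
def decodeFl : Bool × Bool × Bool → Option String
  | (s, d, u) =>
    if u then some "unknown"
    else if s then some (if d then "mixed" else "values")
    else if d then some "points"
    else none

-- A's loop body, named for the lemmas
def stepA (st : Bool × Bool × Bool) (t : List String) : Bool × Bool × Bool :=
  let (single, double, unknown) := st
  if t.length == 1 then
    if floatOk (PySem.List.pyGetD t 0 "") then (true, double, unknown)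
    else (single, double, true)
  else if t.length == 2 then
    if floatOk (PySem.List.pyGetD t 0 "") && floatOk (PySem.List.pyGetD t 1 "") then
      (single, true, unknown)
    else (single, double, true)
  else (single, double, true)

-- one step of A, decoded, is B's merge with the row's schema
theorem pvStep_decode (s d u : Bool) (t : List String) :
    decodeFl (stepA (s, d, u) t) = some (mergeSchema (decodeFl (s, d, u)) (rowSchema t)) := by
  have hrow : rowSchema t = "values" ∨ rowSchema t = "points" ∨ rowSchema t = "unknown" := by
    unfold rowSchema; split_ifs <;> simp
  match t with
  | [] =>
    cases s <;> cases d <;> cases u <;> simp [stepA, rowSchema, mergeSchema, decodeFl]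
  | [x] =>
    by_cases h : floatOk x <;>
      cases s <;> cases d <;> cases u <;>
        simp [stepA, rowSchema, mergeSchema, decodeFl, h,
          PySem.List.pyGetD, PySem.List.pyGet?, PySem.List.pyIdx?]
  | [x, y] =>
    by_cases h1 : floatOk x <;> by_cases h2 : floatOk y <;>
      cases s <;> cases d <;> cases u <;>
        simp [stepA, rowSchema, mergeSchema, decodeFl, h1, h2,
          PySem.List.pyGetD, PySem.List.pyGet?, PySem.List.pyIdx?]
  | x :: y :: z :: r =>
    cases s <;> cases d <;> cases u <;>
      simp [stepA, rowSchema, mergeSchema, decodeFl, List.length_cons]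

-- once the unknown flag is set, A's fold keeps it set
theorem pvFold_absorb (data : List (List String)) (s d : Bool) :
    decodeFl (data.foldl stepA (s, d, true)) = some "unknown" := by
  induction data generalizing s d with
  | nil => simp [decodeFl]
  | cons t rest ih =>
    have h : ∃ s' d', stepA (s, d, true) t = (s', d', true) := by
      unfold stepA; split_ifs <;> exact ⟨_, _, rfl⟩
    obtain ⟨s', d', h⟩ := h
    simp [List.foldl_cons, h, ih]

-- B's early-exit loop computes the decode of A's full fold
theorem pvGoB_fold (data : List (List String)) (s d u : Bool) :
    goB (decodeFl (s, d, u)) data = decodeFl (data.foldl stepA (s, d, u)) := by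
  induction data generalizing s d u with
  | nil => simp [goB]
  | cons t rest ih =>
    rcases hst : stepA (s, d, u) t with ⟨s', d', u'⟩
    have hd : some (mergeSchema (decodeFl (s, d, u)) (rowSchema t)) = decodeFl (s', d', u') := by
      rw [← pvStep_decode, hst]
    simp only [goB, List.foldl_cons, hst]
    cases u' with
    | true =>
      have hm : mergeSchema (decodeFl (s, d, u)) (rowSchema t) = "unknown" := by
        cases s' <;> cases d' <;> simp_all [decodeFl]
      rw [hm]
      simp [pvFold_absorb]
    | false =>
      have hm : mergeSchema (decodeFl (s, d, u)) (rowSchema t) ≠ "unknown" := by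
        intro h
        rw [h] at hd
        cases s' <;> cases d' <;> simp_all [decodeFl]
      rw [if_neg hm, hd]
      exact ih s' d' false

-- A's anonymous loop body is stepA
theorem pvFun_eq :
    (fun (st : Bool × Bool × Bool) (t : List String) =>
      let (single, double, unknown) := st
      if t.length == 1 then
        if floatOk (PySem.List.pyGetD t 0 "") then (true, double, unknown)
        else (single, double, true)
      else if t.length == 2 then
        if floatOk (PySem.List.pyGetD t 0 "") && floatOk (PySem.List.pyGetD t 1 "") then
          (single, true, unknown)
        else (single, double, true)
      else (single, double, true)) = stepA := rfl

-- A's final if-chain is the decode of its flag triple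
theorem pvA_eq (data : List (List String)) :
    infer_data_schema data = (decodeFl (data.foldl stepA (false, false, false))).getD "" := by
  unfold infer_data_schema
  rw [pvFun_eq]
  generalize data.foldl stepA (false, false, false) = st
  obtain ⟨s, d, u⟩ := st
  cases s <;> cases d <;> cases u <;> simp [decodeFl]

-- ===== VERDICT =====
theorem infer_data_schema_spec : Claim_equal_infer_data_schema := by
  intro data _ _
  unfold Spec_infer_data_schema infer_data_schema_alt
  rw [pvA_eq]
  have h := pvGoB_fold data false false false
  have h0 : decodeFl (false, false, false) = none := rfl
  rw [h0] at h
  rw [h]
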